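-- pv_equiv track=rewrite | github.com/rasmusnuko/4sem | PL/assignments/part1/my-project/unit_tests/isValid/testWriter.py | arrangeCards
-- ===== SOURCE A (Python) =====
-- def arrangeCards(cards):
--   p1Names = sorted([card[0] for card in cards[:2]])
--   p2Names = sorted([card[0] for card in cards[2:4]])
--   p1 = []
--   for name in p1Names:
--     for card in cards:
--       if name == card[0]:
--         p1.append(card)
--         break
--   p2 = []
--   for name in p2Names:
--     for card in cards:
--       if name == card[0]:
--         p2.append(card)
--         break
--   result = []
--   result.extend(p1)
--   result.extend(p2)
--   result.append(cards[4])
--   return result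
-- ===== SOURCE B (Python) =====
-- def arrangeCards(cards):
--   a, b, c, d = cards[0], cards[1], cards[2], cards[3]
--   names = ([a[0], b[0]] if a[0] <= b[0] else [b[0], a[0]]) \
--         + ([c[0], d[0]] if c[0] <= d[0] else [d[0], c[0]])
--   slots = [(None, n) for n in names]
--   for card in cards:
--     slots = [(card, n) if r is None and n == card[0] else (r, n) for (r, n) in slots]
--   return [r for (r, n) in slots] + [cards[4]]
-- ===== Notes on version B (the rewrite author's own statement) =====
-- stated objective: alternative
-- what changed: B replaces A's sorted() calls and per-name rescans of the card list by a direct compare-and-swap of the two names per player and ONE forward pass over cards that fills a fixed 4-slot table (each slot takes the first card whose name matches), so the inner scan per name disappears.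
import Mathlib
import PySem

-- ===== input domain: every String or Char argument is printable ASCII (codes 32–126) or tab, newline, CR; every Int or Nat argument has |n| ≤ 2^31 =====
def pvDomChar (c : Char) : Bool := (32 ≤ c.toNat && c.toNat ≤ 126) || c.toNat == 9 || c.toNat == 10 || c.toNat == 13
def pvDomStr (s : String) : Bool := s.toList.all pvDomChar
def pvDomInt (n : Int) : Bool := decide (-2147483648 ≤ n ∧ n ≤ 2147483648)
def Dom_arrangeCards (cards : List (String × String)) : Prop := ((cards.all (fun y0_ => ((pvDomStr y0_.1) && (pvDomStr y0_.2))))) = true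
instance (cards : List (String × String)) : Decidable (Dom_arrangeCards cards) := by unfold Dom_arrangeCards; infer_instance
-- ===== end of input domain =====

-- B replaces A's sorted() + per-name rescans by a compare-and-swap of each player's two names
-- and a single forward pass over cards filling a 4-slot table (alternative decomposition; return value only).


-- ===== PORT A =====
-- A's inner 'for card in cards: if name == card[0]: append; break' — the ≤1 appended card.
def pvScan (name : String) : List (String × String) → List (String × String)
  | [] => []
  | c :: rest => if name = c.1 then [c] else pvScan name rest

def arrangeCards (cards : List (String × String)) : List (String × String) :=
  let p1Names := PySem.List.sorted ((PySem.List.slice cards none (some 2)).map (·.1)) (fun x => x) false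
  let p2Names := PySem.List.sorted ((PySem.List.slice cards (some 2) (some 4)).map (·.1)) (fun x => x) false
  let p1 := p1Names.foldl (fun acc name => acc ++ pvScan name cards) []
  let p2 := p2Names.foldl (fun acc name => acc ++ pvScan name cards) []
  (([] ++ p1) ++ p2) ++ [PySem.List.pyGetD cards 4 ("", "")]   -- cards[4]: IndexError excluded by Pre_

-- ===== PORT B =====
def arrangeCards_alt (cards : List (String × String)) : List (String × String) :=
  -- cards[0]..cards[3]: IndexError excluded by Pre_ (length ≥ 5)
  let a := PySem.List.pyGetD cards 0 ("", "")
  let b := PySem.List.pyGetD cards 1 ("", "")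
  let c := PySem.List.pyGetD cards 2 ("", "")
  let d := PySem.List.pyGetD cards 3 ("", "")
  let names := (if a.1 ≤ b.1 then [a.1, b.1] else [b.1, a.1])
             ++ (if c.1 ≤ d.1 then [c.1, d.1] else [d.1, c.1])
  let slots := names.map (fun n => ((none : Option (String × String)), n))
  let final := cards.foldl
      (fun sl card => sl.map (fun p => if p.1 = none ∧ p.2 = card.1 then (some card, p.2) else p))
      slots
  -- every slot name comes from cards, so each slot is filled; default unreachable
  final.map (fun p => p.1.getD ("", "")) ++ [PySem.List.pyGetD cards 4 ("", "")]

-- ===== PRECONDITION & SPEC =====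
-- A (and B) raise IndexError at cards[4] when the list has fewer than 5 cards.
def Pre_arrangeCards (cards : List (String × String)) : Prop := PySem.Raise.InRange cards.length 4
instance (cards : List (String × String)) : Decidable (Pre_arrangeCards cards) := by unfold Pre_arrangeCards; infer_instance
def pvWitness_arrangeCards : (List (String × String)) :=
  [("b", "1"), ("a", "2"), ("d", "3"), ("c", "4"), ("e", "5")]

def Spec_arrangeCards (cards : List (String × String)) (out : List (String × String)) : Prop := out = arrangeCards_alt cards
instance (cards : List (String × String)) (out : List (String × String)) : Decidable (Spec_arrangeCards cards out) := by unfold Spec_arrangeCards; infer_instance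

-- ===== CLAIM (what is proved, stated in full; the proofs are below) =====
def Claim_equal_arrangeCards : Prop := ∀ (cards : List (String × String)), Dom_arrangeCards cards → Pre_arrangeCards cards → Spec_arrangeCards cards (arrangeCards cards)

-- ===== LEMMAS AND PROOFS =====

-- B's single fill pass computes, slotwise, the first card of cards carrying the slot's name
theorem fill_eq (cards : List (String × String)) (slots : List (Option (String × String) × String)) :
    cards.foldl
      (fun sl card => sl.map (fun p => if p.1 = none ∧ p.2 = card.1 then (some card, p.2) else p))
      slots
    = slots.map (fun p => ((p.1.orElse (fun _ => (pvScan p.2 cards).head?)), p.2)) := by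
  induction cards generalizing slots with
  | nil =>
    simp [pvScan]
  | cons c rest ih =>
    rw [List.foldl_cons, ih, List.map_map]
    apply List.map_congr_left
    intro p _
    cases hr : p.1 with
    | some v => simp [hr, pvScan]
    | none =>
      by_cases hn : p.2 = c.1 <;> simp [hr, hn, pvScan]

-- a name occurring in cards is found by the scan
theorem pvScan_of_mem (name : String) (cards : List (String × String))
    (h : name ∈ cards.map (·.1)) : pvScan name cards = [((pvScan name cards).head?).getD ("", "")] := by
  induction cards with
  | nil => simp at h
  | cons c rest ih =>
    by_cases hn : name = c.1
    · simp [pvScan, hn]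
    · simp only [List.map_cons, List.mem_cons] at h
      rcases h with h | h
      · exact absurd h hn
      · simp only [pvScan, if_neg hn]
        exact ih h

-- A's append-loop over names whose scans are singletons is a map
theorem foldl_append_eq_map {α β : Type} (l : List α) (f : α → List β) (g : α → β)
    (h : ∀ x ∈ l, f x = [g x]) (init : List β) :
    l.foldl (fun acc x => acc ++ f x) init = init ++ l.map g := by
  induction l generalizing init with
  | nil => simp
  | cons x rest ih =>
    simp only [List.foldl_cons, List.map_cons]
    rw [ih (fun y hy => h y (List.mem_cons_of_mem _ hy)), h x (List.mem_cons_self)]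
    simp

-- sorting two keys is a compare-and-swap (stable: ties keep order)
theorem sorted_pair (x y : String) :
    PySem.List.sorted [x, y] (fun s => s) false = if x ≤ y then [x, y] else [y, x] := by
  split
  · exact PySem.List.sorted_id_eq_of_perm_of_pairwise _ _ (List.Perm.refl _)
      (by simp [String.le_iff_toList_le.mp ‹x ≤ y›])
  · exact PySem.List.sorted_id_eq_of_perm_of_pairwise _ _ (List.Perm.swap x y [])
      (by simp [String.le_iff_toList_le.mp (le_of_not_ge ‹¬ x ≤ y›)])

-- ===== VERDICT (by name: the statement is the Claim_ definition above) =====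
theorem arrangeCards_spec : Claim_equal_arrangeCards := by
  intro cards _ hpre
  obtain ⟨c0, c1, c2, c3, c4, rest, rfl⟩ :
      ∃ c0 c1 c2 c3 c4 rest, cards = c0 :: c1 :: c2 :: c3 :: c4 :: rest := by
    unfold Pre_arrangeCards PySem.Raise.InRange at hpre
    match cards, hpre with
    | a :: b :: c :: d :: e :: r, _ => exact ⟨a, b, c, d, e, r, rfl⟩
  set cards := c0 :: c1 :: c2 :: c3 :: c4 :: rest with hc
  unfold Spec_arrangeCards arrangeCards arrangeCards_alt
  have hmem : ∀ n ∈ [c0.1, c1.1] ++ [c2.1, c3.1], n ∈ cards.map (·.1) := by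
    intro n hn; simp only [hc, List.map_cons]; simp at hn ⊢; tauto
  have hslice1 : PySem.List.slice cards none (some 2) = [c0, c1] := by
    simp [hc, PySem.List.slice]
  have hslice2 : PySem.List.slice cards (some 2) (some 4) = [c2, c3] := by
    simp [hc, PySem.List.slice]
  rw [hslice1, hslice2]
  simp only [List.map_cons, List.map_nil, sorted_pair, fill_eq, List.map_map]
  have ha : PySem.List.pyGetD cards 0 ("", "") = c0 := by rw [hc, PySem.List.pyGetD_ofNat']; rfl
  have hb : PySem.List.pyGetD cards 1 ("", "") = c1 := by rw [hc, PySem.List.pyGetD_ofNat']; rfl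
  have hcc : PySem.List.pyGetD cards 2 ("", "") = c2 := by rw [hc, PySem.List.pyGetD_ofNat']; rfl
  have hd : PySem.List.pyGetD cards 3 ("", "") = c3 := by rw [hc, PySem.List.pyGetD_ofNat']; rfl
  rw [ha, hb, hcc, hd]
  have key : ∀ (ns : List String), (∀ n ∈ ns, n ∈ cards.map (·.1)) →
      ns.foldl (fun acc name => acc ++ pvScan name cards) []
        = ns.map (fun n => ((pvScan n cards).head?).getD ("", "")) := by
    intro ns hns
    rw [foldl_append_eq_map ns (fun n => pvScan n cards)
          (fun n => ((pvScan n cards).head?).getD ("", ""))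
          (fun n hn => pvScan_of_mem n cards (hns n hn)) []]
    simp
  split_ifs with h1 h2 h2 <;>
    rw [key _ (fun n hn => hmem n (by simp at hn ⊢; tauto)),
        key _ (fun n hn => hmem n (by simp at hn ⊢; tauto))] <;>
    simp
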